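-- pv_equiv track=rewrite | github.com/lalas0825/AlgoICT | algoict-engine/scripts/analyze_daily_breakdown.py | _consecutive_losses_in_day
-- ===== SOURCE A (Python) =====
-- def _consecutive_losses_in_day(trades_of_day: list) -> int:
--     """Max consecutive loss streak within a single day."""
--     max_streak = 0
--     cur = 0
--     for t in trades_of_day:
--         if t["pnl"] <= 0:
--             cur += 1
--             max_streak = max(max_streak, cur)
--         else:
--             cur = 0
--     return max_streak
-- ===== SOURCE B (Python) =====
-- from itertools import groupby
--
--
-- def _consecutive_losses_in_day(trades_of_day: list) -> int:
--     """Max consecutive loss streak within a single day."""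
--     flags = [t["pnl"] <= 0 for t in trades_of_day]
--     return max((sum(1 for _ in run) for key, run in groupby(flags) if key),
--                default=0)
-- ===== Notes on version B (the rewrite author's own statement) =====
-- stated objective: idiomatic
-- what changed: Replaces the running counter/max accumulator loop by a group-then-reduce pipeline: build a loss flag per trade, split the flags into maximal equal runs with itertools.groupby, and take the max length over the loss runs (default 0); no per-element branch or mutable streak state.
import Mathlib
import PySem

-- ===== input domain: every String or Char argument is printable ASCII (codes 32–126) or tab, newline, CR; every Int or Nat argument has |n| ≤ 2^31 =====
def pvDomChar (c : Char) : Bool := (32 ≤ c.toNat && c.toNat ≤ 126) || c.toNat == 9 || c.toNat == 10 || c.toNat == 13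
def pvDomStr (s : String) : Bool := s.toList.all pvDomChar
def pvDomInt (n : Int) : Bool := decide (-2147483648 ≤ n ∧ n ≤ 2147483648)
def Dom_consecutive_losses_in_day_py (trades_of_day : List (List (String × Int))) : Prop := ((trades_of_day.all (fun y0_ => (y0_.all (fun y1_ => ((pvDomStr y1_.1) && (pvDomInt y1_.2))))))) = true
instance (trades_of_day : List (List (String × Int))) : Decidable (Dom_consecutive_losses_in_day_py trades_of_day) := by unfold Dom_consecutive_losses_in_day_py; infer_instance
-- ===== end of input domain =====

-- B replaces A's running counter/max loop by a group-then-reduce pipeline (flags, maximal runs, max loss-run length).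

-- t["pnl"]: first-match lookup in the association list; Pre_ excludes the KeyError (none) case, the 0 default is never read there.
def pvPnl (t : List (String × Int)) : Int := ((PySem.Dict.mk t).get? "pnl").getD 0

-- ===== PORT A =====
def consecutive_losses_in_day_py (trades_of_day : List (List (String × Int))) : Int :=
  (trades_of_day.foldl
    (fun (st : Int × Int) t =>
      if pvPnl t ≤ 0 then (max st.1 (st.2 + 1), st.2 + 1) else (st.1, 0))
    (0, 0)).1

-- ===== PORT B =====
-- itertools.groupby over the flag list: maximal runs of equal flags, in order, as (flag, length) pairs.
def pvRunsGo (b : Bool) (n : Nat) : List Bool → List (Bool × Nat)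
  | [] => [(b, n)]
  | x :: xs => if x = b then pvRunsGo b (n + 1) xs else (b, n) :: pvRunsGo x 1 xs

def pvRuns : List Bool → List (Bool × Nat)
  | [] => []
  | x :: xs => pvRunsGo x 1 xs

def consecutive_losses_in_day_py_alt (trades_of_day : List (List (String × Int))) : Int :=
  let flags := trades_of_day.map (fun t => decide (pvPnl t ≤ 0))
  -- max(lengths of the True runs, default=0)
  (((pvRuns flags).filter (fun p => p.1)).map (fun p => (p.2 : Int))).foldl max 0

-- ===== PRECONDITION & SPEC =====
-- Pre_ excludes exactly the inputs where some trade has no "pnl" key (Python A raises KeyError there).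
def Pre_consecutive_losses_in_day_py (trades_of_day : List (List (String × Int))) : Prop :=
  (trades_of_day.all (fun t => (PySem.Dict.mk t).contains "pnl")) = true
instance (trades_of_day : List (List (String × Int))) : Decidable (Pre_consecutive_losses_in_day_py trades_of_day) := by unfold Pre_consecutive_losses_in_day_py; infer_instance

def pvWitness_consecutive_losses_in_day_py : (List (List (String × Int))) :=
  [[("pnl", -2)], [("pnl", 5)], [("pnl", 0)], [("pnl", -1)]]

def Spec_consecutive_losses_in_day_py (trades_of_day : List (List (String × Int))) (out : Int) : Prop := out = consecutive_losses_in_day_py_alt trades_of_day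
instance (trades_of_day : List (List (String × Int))) (out : Int) : Decidable (Spec_consecutive_losses_in_day_py trades_of_day out) := by unfold Spec_consecutive_losses_in_day_py; infer_instance

-- ===== CLAIM (what is proved, stated in full; the proofs are below) =====
def Claim_equal_consecutive_losses_in_day_py : Prop := ∀ (trades_of_day : List (List (String × Int))), Dom_consecutive_losses_in_day_py trades_of_day → Pre_consecutive_losses_in_day_py trades_of_day → Spec_consecutive_losses_in_day_py trades_of_day (consecutive_losses_in_day_py trades_of_day)

-- ===== LEMMAS AND PROOFS =====

-- The streak value A's loop still can reach, with the current run already c long.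
def pvAux : List Bool → Int → Int
  | [], _ => 0
  | true :: bs, c => max (c + 1) (pvAux bs (c + 1))
  | false :: bs, _ => pvAux bs 0

theorem pvAux_nonneg (bs : List Bool) (c : Int) : 0 ≤ pvAux bs c := by
  induction bs generalizing c with
  | nil => simp [pvAux]
  | cons b bs ih =>
    cases b
    · exact ih 0
    · simpa [pvAux] using Or.inr (ih (c + 1))

theorem pvLoop_eq_aux (bs : List Bool) (m c : Int) (hm : 0 ≤ m) (hc : 0 ≤ c) :
    (bs.foldl (fun (st : Int × Int) b =>
        if b then (max st.1 (st.2 + 1), st.2 + 1) else (st.1, 0)) (m, c)).1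
      = max m (pvAux bs c) := by
  induction bs generalizing m c with
  | nil => simp [pvAux]; omega
  | cons b bs ih =>
    cases b with
    | true =>
      simp only [List.foldl_cons, if_true, pvAux]
      rw [ih (max m (c + 1)) (c + 1) (by omega) (by omega)]
      omega
    | false =>
      simp only [List.foldl_cons, Bool.false_eq_true, if_false, pvAux]
      exact ih m 0 hm le_rfl

-- max of the True-run lengths of a run list
def pvM : List (Bool × Nat) → Int
  | [] => 0
  | (b, n) :: rs => if b then max (n : Int) (pvM rs) else pvM rs

theorem pvFold_shift (l : List Int) (a b : Int) :
    l.foldl max (max a b) = max a (l.foldl max b) := by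
  induction l generalizing b with
  | nil => simp
  | cons x xs ih => simp only [List.foldl_cons, max_assoc, ih]

theorem pvF_eq_M (rs : List (Bool × Nat)) :
    ((rs.filter (fun p => p.1)).map (fun p => (p.2 : Int))).foldl max 0 = pvM rs := by
  induction rs with
  | nil => simp [pvM]
  | cons p rs ih =>
    obtain ⟨b, n⟩ := p
    cases b with
    | true =>
      simp only [List.filter_cons, List.map_cons, List.foldl_cons, pvM, if_true]
      rw [show max (0 : Int) (n : Int) = max (n : Int) 0 from max_comm _ _, pvFold_shift, ih]
    | false => simpa [pvM] using ih

theorem pvM_runsGo (bs : List Bool) (b : Bool) (n : Nat) :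
    pvM (pvRunsGo b n bs) = if b then max (n : Int) (pvAux bs (n : Int)) else pvAux bs 0 := by
  induction bs generalizing b n with
  | nil =>
    cases b <;> simp [pvRunsGo, pvM, pvAux]
  | cons x xs ih =>
    cases x with
    | true =>
      cases b with
      | true =>
        simp only [pvRunsGo, if_true, ih, pvAux]
        push_cast
        omega
      | false =>
        simp [pvRunsGo, pvM, ih, pvAux]
    | false =>
      cases b with
      | true =>
        simp [pvRunsGo, pvM, ih, pvAux]
      | false =>
        simp [pvRunsGo, ih, pvAux]

theorem pvM_runs (bs : List Bool) : pvM (pvRuns bs) = pvAux bs 0 := by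
  cases bs with
  | nil => simp [pvRuns, pvM, pvAux]
  | cons x xs =>
    cases x with
    | true => simp [pvRuns, pvM_runsGo, pvAux]
    | false => simp [pvRuns, pvM_runsGo, pvAux]

-- ===== VERDICT (by name: the statement is the Claim_ definition above) =====
theorem consecutive_losses_in_day_py_spec : Claim_equal_consecutive_losses_in_day_py := by
  intro trades _ _
  unfold Spec_consecutive_losses_in_day_py consecutive_losses_in_day_py consecutive_losses_in_day_py_alt
  have hfold :
      (trades.foldl (fun (st : Int × Int) t =>
          if pvPnl t ≤ 0 then (max st.1 (st.2 + 1), st.2 + 1) else (st.1, 0)) (0, 0))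
        = ((trades.map (fun t => decide (pvPnl t ≤ 0))).foldl
            (fun (st : Int × Int) b =>
              if b then (max st.1 (st.2 + 1), st.2 + 1) else (st.1, 0)) (0, 0)) := by
    rw [List.foldl_map]
    congr 1
    funext st t
    by_cases h : pvPnl t ≤ 0 <;> simp [h]
  rw [hfold, pvLoop_eq_aux _ 0 0 le_rfl le_rfl, pvF_eq_M, pvM_runs]
  simp [max_eq_right (pvAux_nonneg _ 0)]
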